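-- pv_equiv track=rewrite | github.com/msowho/s3-special-stage-demo | main.py | do_square_of_circles
-- ===== SOURCE A (Python) =====
-- colors = {
--     'red': (255, 0, 0)
-- }
--
-- def do_square_of_circles(x, z, size=2, radius=25):
--     result = []
--
--     if size < 2:
--         return []
--
--     current_x = -(radius * size) + x
--     current_z = -(radius * size) + z
--
--     i = 0
--     j = 0
--     rendering = True
--     while rendering:
--         if j == size:
--             break
--         if j == 0 or j == size-1:
--             result.append((current_x, 0, current_z, colors['red']))
--         else:
--             if i == 0 or i == size-1:
--                 result.append((current_x, 0, current_z, colors['red']))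
--         current_x += radius * 3
--         i += 1
--         if i == size:
--             current_x = -(radius * size) + x
--             current_z += radius * 3
--             i = 0
--             j += 1
--
--     return result
-- ===== SOURCE B (Python) =====
-- colors = {
--     'red': (255, 0, 0)
-- }
--
-- def do_square_of_circles(x, z, size=2, radius=25):
--     # Emit only the border cells directly: full top row, the two end columns
--     # of each middle row, then the full bottom row.  O(size) instead of O(size^2).
--     if size < 2:
--         return []
--     red = colors['red']
--     sx = -(radius * size) + x
--     sz = -(radius * size) + z
--     step = radius * 3
--     out = [(sx + i * step, 0, sz, red) for i in range(size)]
--     for j in range(1, size - 1):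
--         zz = sz + j * step
--         out.append((sx, 0, zz, red))
--         out.append((sx + (size - 1) * step, 0, zz, red))
--     zz = sz + (size - 1) * step
--     out.extend((sx + i * step, 0, zz, red) for i in range(size))
--     return out
-- ===== Notes on version B (the rewrite author's own statement) =====
-- stated objective: faster
-- what changed: Instead of walking all size*size grid cells with manual i/j counters and filtering for the border, B emits the border directly: the full top row, the two end columns of each middle row, and the full bottom row.
import Mathlib
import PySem

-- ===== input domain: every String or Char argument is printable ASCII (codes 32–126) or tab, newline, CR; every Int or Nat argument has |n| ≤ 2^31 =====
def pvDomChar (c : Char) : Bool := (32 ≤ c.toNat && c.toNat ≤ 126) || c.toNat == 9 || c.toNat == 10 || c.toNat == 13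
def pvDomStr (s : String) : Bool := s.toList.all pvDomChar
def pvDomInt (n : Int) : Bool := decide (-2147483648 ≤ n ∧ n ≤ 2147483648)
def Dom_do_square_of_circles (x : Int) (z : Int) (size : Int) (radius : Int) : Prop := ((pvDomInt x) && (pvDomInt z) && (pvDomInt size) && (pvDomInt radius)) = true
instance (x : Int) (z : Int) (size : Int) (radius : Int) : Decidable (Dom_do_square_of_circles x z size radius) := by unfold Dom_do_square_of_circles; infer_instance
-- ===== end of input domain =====

-- B emits the border cells directly (full top/bottom rows, end columns of middle rows) instead of scanning all size*size cells: asymptotically faster.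


-- ===== PORT A =====
-- colors['red']
def pvColorsRed : Int × Int × Int := (255, 0, 0)

-- the while loop of A, with its exact state (current_x, current_z, i, j, result);
-- fuel is only a totality guard: size*size is exactly the number of iterations, so it is never exhausted
def doSquareLoopA (x z size radius : Int) :
    Nat → Int → Int → Int → Int → List (Int × Int × Int × (Int × Int × Int)) →
    List (Int × Int × Int × (Int × Int × Int))
  | 0, _, _, _, _, result => result
  | fuel+1, current_x, current_z, i, j, result =>
    if j = size then result
    else
      let result :=
        if j = 0 ∨ j = size - 1 then result ++ [(current_x, 0, current_z, pvColorsRed)]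
        else if i = 0 ∨ i = size - 1 then result ++ [(current_x, 0, current_z, pvColorsRed)]
        else result
      let current_x := current_x + radius * 3
      let i := i + 1
      if i = size then
        doSquareLoopA x z size radius fuel (-(radius * size) + x) (current_z + radius * 3) 0 (j + 1) result
      else
        doSquareLoopA x z size radius fuel current_x current_z i j result

def do_square_of_circles (x : Int) (z : Int) (size : Int) (radius : Int) : List (Int × Int × Int × (Int × Int × Int)) :=
  if size < 2 then []
  else
    doSquareLoopA x z size radius (size.toNat * size.toNat)
      (-(radius * size) + x) (-(radius * size) + z) 0 0 []

-- ===== PORT B =====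
def do_square_of_circles_alt (x : Int) (z : Int) (size : Int) (radius : Int) : List (Int × Int × Int × (Int × Int × Int)) :=
  if size < 2 then []
  else
    let red : Int × Int × Int := (255, 0, 0)
    let sx := -(radius * size) + x
    let sz := -(radius * size) + z
    let step := radius * 3
    let out := (PySem.List.pyRange 0 size 1).map (fun i => (sx + i * step, (0 : Int), sz, red))
    let out := (PySem.List.pyRange 1 (size - 1) 1).foldl (fun out j =>
        let zz := sz + j * step
        out ++ [(sx, 0, zz, red), (sx + (size - 1) * step, 0, zz, red)]) out
    let zz := sz + (size - 1) * step
    out ++ (PySem.List.pyRange 0 size 1).map (fun i => (sx + i * step, (0 : Int), zz, red))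

-- ===== PRECONDITION & SPEC =====
def Spec_do_square_of_circles (x : Int) (z : Int) (size : Int) (radius : Int) (out : List (Int × Int × Int × (Int × Int × Int))) : Prop := out = do_square_of_circles_alt x z size radius
instance (x : Int) (z : Int) (size : Int) (radius : Int) (out : List (Int × Int × Int × (Int × Int × Int))) : Decidable (Spec_do_square_of_circles x z size radius out) := by unfold Spec_do_square_of_circles; infer_instance

-- ===== CLAIM (what is proved, stated in full; the proofs are below) =====
def Claim_equal_do_square_of_circles : Prop := ∀ (x : Int) (z : Int) (size : Int) (radius : Int), Dom_do_square_of_circles x z size radius → Spec_do_square_of_circles x z size radius (do_square_of_circles x z size radius)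

-- ===== LEMMAS AND PROOFS =====

-- the border cell at row j, column i
def pvCell (x z size radius j i : Int) : Int × Int × Int × (Int × Int × Int) :=
  (-(radius * size) + x + i * (radius * 3), 0, -(radius * size) + z + j * (radius * 3), (255, 0, 0))

-- remaining cells of row j starting at column i
def pvRowTail (x z size radius j i : Int) : List (Int × Int × Int × (Int × Int × Int)) :=
  (PySem.List.pyRange i size 1).flatMap (fun i' =>
    if j = 0 ∨ j = size - 1 ∨ i' = 0 ∨ i' = size - 1 then [pvCell x z size radius j i'] else [])

-- everything A's loop still emits from state (i, j)
def pvTail (x z size radius j i : Int) : List (Int × Int × Int × (Int × Int × Int)) :=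
  pvRowTail x z size radius j i ++
    (PySem.List.pyRange (j + 1) size 1).flatMap (fun j' => pvRowTail x z size radius j' 0)

lemma loopA_stop (x z size radius : Int) (fuel : Nat) (cx cz i : Int)
    (acc : List (Int × Int × Int × (Int × Int × Int))) :
    doSquareLoopA x z size radius fuel cx cz i size acc = acc := by
  cases fuel with
  | zero => rfl
  | succ f => simp [doSquareLoopA]

-- one unfolding of the loop body, with A's two append branches merged into one condition
lemma loopA_succ (x z size radius : Int) (f : Nat) (cx cz i j : Int)
    (acc : List (Int × Int × Int × (Int × Int × Int))) (hj : j ≠ size) :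
    doSquareLoopA x z size radius (f + 1) cx cz i j acc =
      (if i + 1 = size then
        doSquareLoopA x z size radius f (-(radius * size) + x) (cz + radius * 3) 0 (j + 1)
          (if j = 0 ∨ j = size - 1 ∨ i = 0 ∨ i = size - 1 then acc ++ [(cx, 0, cz, pvColorsRed)] else acc)
      else
        doSquareLoopA x z size radius f (cx + radius * 3) cz (i + 1) j
          (if j = 0 ∨ j = size - 1 ∨ i = 0 ∨ i = size - 1 then acc ++ [(cx, 0, cz, pvColorsRed)] else acc)) := by
  simp only [doSquareLoopA, if_neg hj]
  by_cases h1 : j = 0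
  · simp [h1]
  · by_cases h1' : j = size - 1
    · simp [h1']
    · by_cases h2 : i = 0
      · simp [h1, h1', h2]
      · by_cases h2' : i = size - 1 <;> simp [h1, h1', h2, h2']

lemma pyRange_last (size : Int) : PySem.List.pyRange (size - 1) size 1 = [size - 1] := by
  have h := PySem.List.pyRange_one_singleton (a := size - 1)
  rwa [show size - 1 + 1 = size from by ring] at h

lemma pvRowTail_cons (x z size radius j i : Int) (hi : i < size) :
    pvRowTail x z size radius j i =
      (if j = 0 ∨ j = size - 1 ∨ i = 0 ∨ i = size - 1 then [pvCell x z size radius j i] else [])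
        ++ pvRowTail x z size radius j (i + 1) := by
  unfold pvRowTail
  rw [PySem.List.pyRange_one_cons hi, List.flatMap_cons]

lemma loopA_eq (x z size radius : Int) : ∀ (fuel : Nat) (i j : Int)
    (acc : List (Int × Int × Int × (Int × Int × Int))),
    0 ≤ i → i < size → 0 ≤ j → j < size →
    (fuel : Int) = (size - 1 - j) * size + (size - i) →
    doSquareLoopA x z size radius fuel
      (-(radius * size) + x + i * (radius * 3)) (-(radius * size) + z + j * (radius * 3)) i j acc
      = acc ++ pvTail x z size radius j i := by
  intro fuel
  induction fuel with
  | zero =>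
    intro i j acc hi0 hiS hj0 hjS hf
    exfalso
    have h1 : (0 : Int) ≤ (size - 1 - j) * size := mul_nonneg (by omega) (by omega)
    simp only [Nat.cast_zero] at hf
    linarith
  | succ f ih =>
    intro i j acc hi0 hiS hj0 hjS hf
    push_cast at hf
    rw [loopA_succ x z size radius f _ _ i j acc (by omega)]
    by_cases hlast : i + 1 = size
    · rw [if_pos hlast]
      have hieq : i = size - 1 := by omega
      by_cases hrow : j + 1 = size
      · rw [hrow, loopA_stop]
        rw [pvTail, pvRowTail_cons x z size radius j i hiS]
        rw [show pvRowTail x z size radius j (i + 1) = [] from by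
          unfold pvRowTail; rw [hlast, PySem.List.pyRange_one_eq_nil le_rfl]; rfl]
        rw [hrow, PySem.List.pyRange_one_eq_nil (le_refl size)]
        simp [pvCell, pvColorsRed, hieq]
      · have hf' : ((f : Nat) : Int) = (size - 1 - (j + 1)) * size + (size - 0) := by
          rw [hieq] at hf; linear_combination hf
        have hstep := ih 0 (j + 1) (if j = 0 ∨ j = size - 1 ∨ i = 0 ∨ i = size - 1 then
            acc ++ [(-(radius * size) + x + i * (radius * 3), 0,
              -(radius * size) + z + j * (radius * 3), pvColorsRed)] else acc)
          le_rfl (by omega) (by omega) (by omega) hf'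
        rw [show -(radius * size) + x + 0 * (radius * 3) = -(radius * size) + x from by ring,
            show -(radius * size) + z + (j + 1) * (radius * 3)
              = -(radius * size) + z + j * (radius * 3) + radius * 3 from by ring] at hstep
        rw [hstep]
        -- now pure list algebra
        have hcond : (j = 0 ∨ j = size - 1 ∨ i = 0 ∨ i = size - 1) := by right; right; right; omega
        rw [if_pos hcond]
        conv_rhs => rw [pvTail, pvRowTail_cons x z size radius j i hiS, if_pos hcond]
        rw [show pvRowTail x z size radius j (i + 1) = [] from by
          unfold pvRowTail; rw [hlast, PySem.List.pyRange_one_eq_nil le_rfl]; rfl]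
        rw [pvTail]
        rw [show PySem.List.pyRange (j + 1) size 1 = (j+1) :: PySem.List.pyRange (j + 1 + 1) size 1
              from PySem.List.pyRange_one_cons (by omega), List.flatMap_cons]
        simp [pvCell, pvColorsRed]
    · rw [if_neg hlast]
      have hf' : ((f : Nat) : Int) = (size - 1 - j) * size + (size - (i + 1)) := by
        linear_combination hf
      have hstep := ih (i + 1) j (if j = 0 ∨ j = size - 1 ∨ i = 0 ∨ i = size - 1 then
          acc ++ [(-(radius * size) + x + i * (radius * 3), 0,
            -(radius * size) + z + j * (radius * 3), pvColorsRed)] else acc)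
        (by omega) (by omega) (by omega) (by omega) hf'
      rw [show -(radius * size) + x + (i + 1) * (radius * 3)
            = -(radius * size) + x + i * (radius * 3) + radius * 3 from by ring] at hstep
      rw [hstep]
      conv_rhs => rw [pvTail, pvRowTail_cons x z size radius j i hiS]
      rw [pvTail]
      by_cases hcond : (j = 0 ∨ j = size - 1 ∨ i = 0 ∨ i = size - 1) <;>
        simp [hcond, pvCell, pvColorsRed]

lemma pvRowTail_top (x z size radius : Int) :
    pvRowTail x z size radius 0 0 =
      (PySem.List.pyRange 0 size 1).map (fun i => pvCell x z size radius 0 i) := by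
  unfold pvRowTail
  simp [← List.map_eq_flatMap]

lemma pvRowTail_bottom (x z size radius : Int) :
    pvRowTail x z size radius (size - 1) 0 =
      (PySem.List.pyRange 0 size 1).map (fun i => pvCell x z size radius (size - 1) i) := by
  unfold pvRowTail
  simp [← List.map_eq_flatMap]

lemma pvRowTail_mid (x z size radius j : Int) (h1 : 0 < j) (h2 : j < size - 1) :
    pvRowTail x z size radius j 0
      = [pvCell x z size radius j 0, pvCell x z size radius j (size - 1)] := by
  unfold pvRowTail
  rw [show PySem.List.pyRange 0 size 1 = 0 :: PySem.List.pyRange 1 size 1 from by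
        simpa using PySem.List.pyRange_one_cons (by omega : (0:Int) < size),
      List.flatMap_cons,
      show PySem.List.pyRange 1 size 1 = PySem.List.pyRange 1 (size - 1) 1 ++ [size - 1] from by
        rw [PySem.List.pyRange_one_append 1 (size - 1) size (by omega) (by omega), pyRange_last],
      List.flatMap_append, List.flatMap_cons]
  rw [List.flatMap_eq_nil_iff.mpr (fun a ha => by
        rw [PySem.List.mem_pyRange_one] at ha
        rw [if_neg (by omega)])]
  rw [if_pos (by omega), if_pos (by omega)]
  simp

theorem do_square_of_circles_spec : Claim_equal_do_square_of_circles := by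
  unfold Claim_equal_do_square_of_circles Spec_do_square_of_circles
  intro x z size radius _
  unfold do_square_of_circles do_square_of_circles_alt
  by_cases hs : size < 2
  · simp [hs]
  · rw [if_neg hs, if_neg hs]
    have hfuel : ((size.toNat * size.toNat : Nat) : Int) = (size - 1 - 0) * size + (size - 0) := by
      push_cast
      rw [Int.toNat_of_nonneg (by omega : (0:Int) ≤ size)]
      ring
    have hA := loopA_eq x z size radius (size.toNat * size.toNat) 0 0 [] le_rfl (by omega)
      le_rfl (by omega) hfuel
    rw [show -(radius * size) + x + 0 * (radius * 3) = -(radius * size) + x from by ring,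
        show -(radius * size) + z + 0 * (radius * 3) = -(radius * size) + z from by ring] at hA
    rw [hA, List.nil_append]
    rw [pvTail, pvRowTail_top]
    rw [show (0:Int) + 1 = 1 from by norm_num]
    rw [show PySem.List.pyRange 1 size 1 = PySem.List.pyRange 1 (size - 1) 1 ++ [size - 1] from by
          rw [PySem.List.pyRange_one_append 1 (size - 1) size (by omega) (by omega), pyRange_last],
        List.flatMap_append]
    rw [show List.flatMap (fun j' => pvRowTail x z size radius j' 0) [size - 1]
          = pvRowTail x z size radius (size - 1) 0 from by simp]
    rw [pvRowTail_bottom]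
    simp only [PySem.List.foldl_append_eq_flatMap]
    simp [pvCell]
    exact List.flatMap_congr (fun a ha => by
      rw [PySem.List.mem_pyRange_one] at ha
      rw [pvRowTail_mid x z size radius a (by omega) (by omega)]
      simp [pvCell])
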